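-- pv_equiv track=rewrite | github.com/Jeecis/AdventOfCode | AdventOfCodeDay9/main.py | check_sum_part_1
-- ===== SOURCE A (Python) =====
-- def check_sum_part_1(memoryArray):
--     sum=0
--     for i in range(len(memoryArray)):
--         elem=memoryArray[i]
--         if elem ==-1:
--             return sum
--         sum+=i*elem
--     return sum
-- ===== SOURCE B (Python) =====
-- def check_sum_part_1(memoryArray):
--     # B: multiplication-free algorithm. Take the prefix before the first -1,
--     # then scan it in REVERSE keeping a running suffix sum: adding the running
--     # sum before each element contributes each a[i] exactly i times, so the
--     # total equals sum(i * a[i]) without any multiplication.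
--     try:
--         prefix = memoryArray[:memoryArray.index(-1)]
--     except ValueError:
--         prefix = memoryArray
--     total = 0
--     running = 0
--     for x in reversed(prefix):
--         total += running
--         running += x
--     return total
-- ===== Notes on version B (the rewrite author's own statement) =====
-- stated objective: alternative
-- what changed: Replaces the fused index-weighted early-exit loop with a multiplication-free algorithm: slice off the prefix before the first -1, then traverse it in reverse maintaining a running suffix sum whose repeated addition contributes each element exactly its index many times.
import Mathlib
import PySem

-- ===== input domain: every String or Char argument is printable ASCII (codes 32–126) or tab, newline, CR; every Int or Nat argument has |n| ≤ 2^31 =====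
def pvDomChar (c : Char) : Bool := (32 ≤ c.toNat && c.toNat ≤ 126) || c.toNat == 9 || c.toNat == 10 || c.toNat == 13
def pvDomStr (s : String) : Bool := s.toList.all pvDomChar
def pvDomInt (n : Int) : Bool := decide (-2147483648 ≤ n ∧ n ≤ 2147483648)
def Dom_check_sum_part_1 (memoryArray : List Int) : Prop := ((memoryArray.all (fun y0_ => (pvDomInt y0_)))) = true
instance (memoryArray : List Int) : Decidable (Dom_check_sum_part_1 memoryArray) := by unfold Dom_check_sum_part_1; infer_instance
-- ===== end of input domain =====

-- B replaces A's fused index-weighted early-exit loop by a multiplication-free algorithm: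
-- slice the prefix before the first -1, then scan it in reverse with a running suffix sum.

-- ===== PORT A =====
-- the for-loop over range(len(memoryArray)) with the early 'return sum' on elem == -1
def csumGoA (xs : List Int) : List Int → Int → Int
  | [], s => s
  | i :: is, s =>
    let elem := PySem.List.pyGetD xs i 0
    if elem = -1 then s else csumGoA xs is (s + i * elem)

def check_sum_part_1 (memoryArray : List Int) : Int :=
  csumGoA memoryArray (PySem.List.pyRange 0 (memoryArray.length : Int)) 0

-- ===== PORT B =====
-- 'for x in reversed(prefix): total += running; running += x' with pair state (total, running)
def csumGoB : List Int → Int × Int → Int × Int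
  | [], st => st
  | x :: xs, (total, running) => csumGoB xs (total + running, running + x)

def check_sum_part_1_alt (memoryArray : List Int) : Int :=
  let pfx : List Int :=
    match PySem.List.index? memoryArray (-1) with
    | some k => PySem.List.slice memoryArray none (some (k : Int))  -- memoryArray[:memoryArray.index(-1)]
    | none => memoryArray                                           -- except ValueError
  (csumGoB pfx.reverse (0, 0)).1

-- ===== PRECONDITION & SPEC =====
def Spec_check_sum_part_1 (memoryArray : List Int) (out : Int) : Prop := out = check_sum_part_1_alt memoryArray
instance (memoryArray : List Int) (out : Int) : Decidable (Spec_check_sum_part_1 memoryArray out) := by unfold Spec_check_sum_part_1; infer_instance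

-- ===== CLAIM (what is proved, stated in full; the proofs are below) =====
def Claim_equal_check_sum_part_1 : Prop := ∀ (memoryArray : List Int), Dom_check_sum_part_1 memoryArray → Spec_check_sum_part_1 memoryArray (check_sum_part_1 memoryArray)

-- ===== LEMMAS AND PROOFS =====

-- index-weighted sum Σ i * l[i], by the head-shift recursion W (x::xs) = W xs + sum xs
def wSum : List Int → Int
  | [] => 0
  | _ :: xs => wSum xs + xs.sum

lemma wSum_append_singleton (l : List Int) (x : Int) :
    wSum (l ++ [x]) = wSum l + l.length * x := by
  induction l with
  | nil => simp [wSum]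
  | cons y l ih =>
    simp only [List.cons_append, wSum, ih, List.sum_append, List.sum_cons, List.sum_nil,
      List.length_cons]
    push_cast
    ring

-- reverse-weighted sum Σ (|l|-1-i) * l[i]
def rSum : List Int → Int
  | [] => 0
  | x :: xs => (xs.length : Int) * x + rSum xs

lemma rSum_append_singleton (l : List Int) (x : Int) :
    rSum (l ++ [x]) = rSum l + l.sum := by
  induction l with
  | nil => simp [rSum]
  | cons y l ih =>
    simp only [List.cons_append, rSum, ih, List.length_append, List.length_cons,
      List.length_nil, List.sum_cons]
    push_cast
    ring

lemma rSum_reverse (l : List Int) : rSum l.reverse = wSum l := by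
  induction l with
  | nil => simp [rSum, wSum]
  | cons x xs ih =>
    simp only [List.reverse_cons, wSum]
    rw [rSum_append_singleton, ih, List.sum_reverse]

-- the B loop unrolled: generic state
lemma csumGoB_eq (m : List Int) : ∀ t r : Int,
    csumGoB m (t, r) = (t + m.length * r + rSum m, r + m.sum) := by
  induction m with
  | nil => intro t r; simp [csumGoB, rSum]
  | cons x xs ih =>
    intro t r
    simp only [csumGoB, ih, rSum, List.length_cons, List.sum_cons, Prod.mk.injEq]
    refine ⟨?_, ?_⟩ <;> (push_cast; ring)

-- index of the first -1 (or length), as a takeWhile length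
def cIdx (xs : List Int) : Nat := (xs.takeWhile (fun x => x != -1)).length

lemma cIdx_cons (x : Int) (xs : List Int) :
    cIdx (x :: xs) = if x = -1 then 0 else cIdx xs + 1 := by
  by_cases h : x = -1 <;> simp [cIdx, h]

lemma cIdx_le (xs : List Int) : cIdx xs ≤ xs.length := by
  induction xs with
  | nil => simp [cIdx]
  | cons x xs ih =>
    rw [cIdx_cons]
    by_cases h : x = -1
    · simp [h]
    · simp only [h, if_false, List.length_cons]
      omega

lemma cIdx_lt (xs : List Int) : ∀ j, j < cIdx xs → xs.getD j 0 ≠ -1 := by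
  induction xs with
  | nil => simp [cIdx]
  | cons x xs ih =>
    intro j hj
    rw [cIdx_cons] at hj
    by_cases h : x = -1
    · simp [h] at hj
    · rw [if_neg h] at hj
      cases j with
      | zero => simpa using h
      | succ j => simpa using ih j (by omega)

lemma cIdx_hit (xs : List Int) : cIdx xs < xs.length → xs.getD (cIdx xs) 0 = -1 := by
  induction xs with
  | nil => simp [cIdx]
  | cons x xs ih =>
    intro h
    rw [cIdx_cons] at h ⊢
    by_cases hx : x = -1
    · simp [hx]
    · rw [if_neg hx] at h ⊢
      simpa using ih (by simpa using Nat.lt_of_succ_lt_succ h)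

-- B's prefix (slice to index of the first -1, or the whole list) is the takeWhile prefix
lemma prefix_eq_takeWhile (xs : List Int) :
    (match PySem.List.index? xs (-1) with
      | some k => PySem.List.slice xs none (some (k : Int))
      | none => xs)
    = xs.takeWhile (fun x => x != -1) := by
  induction xs with
  | nil => simp [PySem.List.index?]
  | cons x xs ih =>
    by_cases h : x = -1
    · subst h
      rw [PySem.List.index?_cons_self]
      simpa using PySem.List.slice_to_natCast ((-1 : Int) :: xs) 0
    · rw [PySem.List.index?_cons_of_ne xs h]
      rw [List.takeWhile_cons_of_pos (by simpa using h)]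
      cases hk : PySem.List.index? xs (-1) with
      | none =>
        rw [hk] at ih
        simp only [Option.map_none]
        exact congrArg (List.cons x) (by simpa using ih)
      | some k =>
        rw [hk] at ih
        have ih' : List.take k xs = xs.takeWhile (fun x => x != -1) := by
          simpa [PySem.List.slice_to_natCast] using ih
        simp only [Option.map_some]
        rw [PySem.List.slice_to_natCast (x :: xs) (k + 1)]
        simp [List.take_succ_cons, ih']

-- the A-side fused loop, related to the weighted sum over pyRange
lemma key (xs : List Int) : ∀ (k i : Nat) (s : Int), xs.length - i ≤ k → i ≤ cIdx xs →
    csumGoA xs (PySem.List.pyRange (i : Int) (xs.length : Int)) s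
      = s + ((PySem.List.pyRange (i : Int) (cIdx xs : Int)).map
          (fun j => j * PySem.List.pyGetD xs j 0)).sum := by
  intro k
  induction k with
  | zero =>
    intro i s hk hc
    have hn : xs.length ≤ i := by omega
    have hc' : cIdx xs ≤ i := le_trans (cIdx_le xs) hn
    rw [PySem.List.pyRange_one_eq_nil (by exact_mod_cast hn),
        PySem.List.pyRange_one_eq_nil (by exact_mod_cast hc')]
    simp [csumGoA]
  | succ k ih =>
    intro i s hk hc
    by_cases hn : xs.length ≤ i
    · have hc' : cIdx xs ≤ i := le_trans (cIdx_le xs) hn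
      rw [PySem.List.pyRange_one_eq_nil (by exact_mod_cast hn),
          PySem.List.pyRange_one_eq_nil (by exact_mod_cast hc')]
      simp [csumGoA]
    · have hn' : i < xs.length := Nat.lt_of_not_le hn
      rw [PySem.List.pyRange_one_cons (by exact_mod_cast hn')]
      simp only [csumGoA]
      have hget : PySem.List.pyGetD xs (i : Int) 0 = xs.getD i 0 := by
        simp [PySem.List.pyGetD_natCast]
      by_cases hic : i < cIdx xs
      · have hne : xs.getD i 0 ≠ -1 := cIdx_lt xs i hic
        rw [if_neg (by rw [hget]; exact hne)]
        rw [show PySem.List.pyRange (i : Int) (cIdx xs : Int) = _ from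
          PySem.List.pyRange_one_cons (by exact_mod_cast hic)]
        have := ih (i + 1) (s + (i : Int) * PySem.List.pyGetD xs (i : Int) 0)
          (by omega) (by omega)
        push_cast at this ⊢
        rw [this]
        simp only [List.map_cons, List.sum_cons]
        ring
      · have hie : i = cIdx xs := by omega
        have hhit : xs.getD i 0 = -1 := hie ▸ cIdx_hit xs (hie ▸ hn')
        rw [if_pos (by rw [hget]; exact hhit)]
        rw [show PySem.List.pyRange (i : Int) (cIdx xs : Int) = [] from
          PySem.List.pyRange_one_eq_nil (by exact_mod_cast hie.ge)]
        simp

-- the weighted sum over pyRange 0 k equals wSum of the k-prefix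
lemma range_sum_eq_wSum (xs : List Int) : ∀ k : Nat, k ≤ xs.length →
    ((PySem.List.pyRange 0 (k : Int)).map (fun j => j * PySem.List.pyGetD xs j 0)).sum
      = wSum (xs.take k) := by
  intro k
  induction k with
  | zero => intro _; simp [PySem.List.pyRange_one_eq_nil, wSum]
  | succ k ih =>
    intro hk
    have hk' : k < xs.length := by omega
    rw [show ((k + 1 : Nat) : Int) = (k : Int) + 1 by push_cast; ring,
        PySem.List.pyRange_one_succ_right (by exact_mod_cast Nat.zero_le k)]
    rw [List.map_append, List.sum_append, ih (by omega)]
    have htake : xs.take (k + 1) = xs.take k ++ [xs.getD k 0] := by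
      rw [List.take_add_one]
      congr 1
      simp [List.getD, List.getElem?_eq_getElem hk']
    rw [htake, wSum_append_singleton]
    simp [PySem.List.pyGetD_natCast, List.length_take, Nat.min_eq_left (le_of_lt hk')]

-- ===== VERDICT (by name: the statement is the Claim_ definition above) =====
theorem check_sum_part_1_spec : Claim_equal_check_sum_part_1 := by
  intro xs _
  unfold Spec_check_sum_part_1 check_sum_part_1 check_sum_part_1_alt
  rw [prefix_eq_takeWhile]
  simp only [csumGoB_eq, rSum_reverse]
  have hA := key xs xs.length 0 0 (by omega) (Nat.zero_le _)
  simp only [Nat.cast_zero, zero_add] at hA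
  rw [hA, range_sum_eq_wSum xs (cIdx xs) (cIdx_le xs)]
  have : xs.takeWhile (fun x => x != -1) = xs.take (cIdx xs) := by
    have := List.prefix_iff_eq_take.mp (List.takeWhile_prefix (l := xs) (fun x => x != -1))
    simpa [cIdx] using this
  simp [this]
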